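-- pv_equiv track=rewrite | github.com/CharleneJiang6/logic-games-in-python | tp4/tp4.py | symetries
-- ===== SOURCE A (Python) =====
-- Grid = tuple[tuple[int, ...], ...]  # eg: ((X,O,X),(X,X,O),(O,X,X))
--
-- def symetries(grid: Grid) -> list[Grid]:
--     """grilles symétriques (rotations et miroirs)"""
--     grids = []
--     g = grid
--     for _ in range(4):  # 4 rotations (0°, 90°, 180°, 270°)
--         grids.append(g)
--         grids.append(tuple(row[::-1] for row in g))  # miroir horizontal
--         # Rotation de 90°
--         g = tuple(zip(*g[::-1]))
--     return grids
-- ===== SOURCE B (Python) =====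
-- def symetries(grid):
--     """grilles symétriques (rotations et miroirs)"""
--     # Only ONE true 90-degree rotation is computed; the remaining symmetries are
--     # obtained algebraically from the identities rot90 = mirror.transpose,
--     # rot180 = vflip.mirror, valid because r1 = rot90(grid) is always rectangular.
--     r1 = tuple(zip(*grid[::-1]))          # rot90 (zip truncates ragged rows)
--     t = tuple(zip(*r1))                   # transpose of r1 (exact: r1 rectangular)
--     mirror = lambda g: tuple(row[::-1] for row in g)
--     return [grid, mirror(grid),
--             r1, mirror(r1),
--             mirror(t), t,
--             mirror(r1)[::-1], r1[::-1]]
-- ===== Notes on version B (the rewrite author's own statement) =====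
-- stated objective: alternative
-- what changed: A iterates the 90-degree rotation four times, mirroring each rotation; B computes only ONE true rotation r1 = zip(*grid[::-1]) plus its transpose and derives the other six symmetries algebraically from the dihedral-group identities rot90 = mirror.transpose and rot180 = vflip.mirror (valid since r1 is always rectangular), so the rotation loop disappears.
import Mathlib
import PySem

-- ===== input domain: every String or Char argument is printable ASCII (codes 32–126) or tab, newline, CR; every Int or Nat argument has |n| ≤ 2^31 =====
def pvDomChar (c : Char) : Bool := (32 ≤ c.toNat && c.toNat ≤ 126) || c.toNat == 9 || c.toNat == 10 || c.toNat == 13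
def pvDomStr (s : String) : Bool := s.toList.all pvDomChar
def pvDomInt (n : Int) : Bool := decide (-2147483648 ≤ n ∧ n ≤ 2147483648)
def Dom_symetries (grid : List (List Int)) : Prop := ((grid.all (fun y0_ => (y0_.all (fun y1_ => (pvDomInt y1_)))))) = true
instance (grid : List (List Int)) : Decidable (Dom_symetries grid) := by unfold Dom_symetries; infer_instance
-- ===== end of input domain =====

-- ===== PORT A =====
-- B computes only one true rotation and derives the remaining symmetries via the
-- dihedral identities rot90 = mirror∘transpose and rot180 = vflip∘mirror (objective: alternative).

-- zip(*rows): columns until the shortest row is exhausted; fuel = length of the first row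
-- (the recursion depth is at most the minimum row length, so this fuel is never binding).
def pvZipAux : Nat → List (List Int) → List (List Int)
  | 0, _ => []
  | n + 1, rows =>
    match rows.mapM List.head? with
    | none => []                                   -- some row exhausted: zip stops
    | some heads => heads :: pvZipAux n (rows.map List.tail)

-- tuple(zip(*rows)) : zip of the rows; zip(*[]) = []
def pvZipCols (rows : List (List Int)) : List (List Int) :=
  match rows with
  | [] => []
  | r :: rs => pvZipAux r.length (r :: rs)

-- tuple(zip(*g[::-1])) : rotation by 90°
def pvRot (g : List (List Int)) : List (List Int) :=
  pvZipCols g.reverse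

-- tuple(row[::-1] for row in g) : horizontal mirror (row[::-1] is exactly List.reverse)
def pvMirror (g : List (List Int)) : List (List Int) :=
  g.map List.reverse

-- A: one loop over range(4) carrying (grids, g); appends g and its mirror, then rotates g.
def symetries (grid : List (List Int)) : List (List (List Int)) :=
  ((PySem.List.pyRange 0 4 1).foldl
    (fun (st : List (List (List Int)) × List (List Int)) _ =>
      (st.1 ++ [st.2] ++ [pvMirror st.2], pvRot st.2))
    ([], grid)).1

-- ===== PORT B =====
-- B: one rotation r1 = zip(*grid[::-1]) and its transpose t = zip(*r1); the six remaining
-- symmetries are mirrors / vertical flips ([::-1] = List.reverse) of grid, r1 and t.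
def symetries_alt (grid : List (List Int)) : List (List (List Int)) :=
  let r1 := pvZipCols grid.reverse
  let t := pvZipCols r1
  [grid, pvMirror grid,
   r1, pvMirror r1,
   pvMirror t, t,
   (pvMirror r1).reverse, r1.reverse]

-- ===== PRECONDITION & SPEC =====
def Spec_symetries (grid : List (List Int)) (out : List (List (List Int))) : Prop := out = symetries_alt grid
instance (grid : List (List Int)) (out : List (List (List Int))) : Decidable (Spec_symetries grid out) := by unfold Spec_symetries; infer_instance

-- ===== CLAIM (what is proved, stated in full; the proofs are below) =====
def Claim_equal_symetries : Prop := ∀ (grid : List (List Int)), Dom_symetries grid → Spec_symetries grid (symetries grid)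

-- ===== LEMMAS AND PROOFS =====
theorem pvRange04 : PySem.List.pyRange 0 4 1 = [0, 1, 2, 3] := by decide

-- mapM head? succeeds on all-nonempty rows and returns the heads
theorem pv_mapM_head (rows : List (List Int)) (h : ∀ r ∈ rows, r ≠ []) :
    rows.mapM List.head? = some (rows.map (fun r => r.getD 0 0)) := by
  induction rows with
  | nil => rfl
  | cons r rs ih =>
    have hr : r ≠ [] := h r (by simp)
    match r, hr with
    | a :: r', _ =>
      simp [List.mapM_cons, ih (fun x hx => h x (by simp [hx]))]

-- closed form of pvZipAux on rectangular input
theorem pvZipAux_eq (c : Nat) : ∀ (rows : List (List Int)), (∀ r ∈ rows, r.length = c) →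
    pvZipAux c rows = (List.range c).map (fun j => rows.map (fun r => r.getD j 0)) := by
  induction c with
  | zero => intro rows _; simp [pvZipAux]
  | succ n ih =>
    intro rows h
    have hne : ∀ r ∈ rows, r ≠ [] := by
      intro r hr hcon
      have := h r hr
      simp [hcon] at this
    have htail : ∀ r ∈ rows.map List.tail, r.length = n := by
      intro r hr
      rcases List.mem_map.1 hr with ⟨s, hs, rfl⟩
      have := h s hs
      simp [List.length_tail, this]
    rw [pvZipAux, pv_mapM_head rows hne, ih _ htail, List.range_succ_eq_map]
    simp only [List.map_cons, List.map_map]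
    congr 1
    apply List.map_congr_left
    intro j _
    simp only [Function.comp]
    apply List.map_congr_left
    intro r hr
    have hr' : r ≠ [] := hne r hr
    match r, hr' with
    | a :: r', _ => simp

-- closed form of pvZipCols on rectangular nonempty input
theorem pvZipCols_eq (rows : List (List Int)) (c : Nat) (hne : rows ≠ [])
    (h : ∀ r ∈ rows, r.length = c) :
    pvZipCols rows = (List.range c).map (fun j => rows.map (fun r => r.getD j 0)) := by
  match rows, hne with
  | r :: rs, _ =>
    have hr : r.length = c := h r (by simp)
    rw [pvZipCols, hr, pvZipAux_eq c _ h]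

-- mapM preserves length when it succeeds
theorem pv_mapM_len : ∀ (rows : List (List Int)) (heads : List Int),
    rows.mapM List.head? = some heads → heads.length = rows.length := by
  intro rows
  induction rows with
  | nil => intro heads h; cases h; rfl
  | cons r rs ih =>
    intro heads h
    simp only [List.mapM_cons, Option.bind_eq_bind, Option.bind_eq_some_iff,
      Option.pure_def, Option.some.injEq] at h
    obtain ⟨a, _, as, has, rfl⟩ := h
    simp [ih as has]

-- every row of pvZipAux has length rows.length
theorem pvZipAux_row_len (c : Nat) : ∀ (rows : List (List Int)),
    ∀ out ∈ pvZipAux c rows, out.length = rows.length := by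
  induction c with
  | zero => intro rows out h; simp [pvZipAux] at h
  | succ n ih =>
    intro rows out h
    rw [pvZipAux] at h
    cases hm : rows.mapM List.head? with
    | none => simp [hm] at h
    | some heads =>
      rw [hm, List.mem_cons] at h
      rcases h with h | h
      · subst h; exact pv_mapM_len rows out hm
      · have := ih (rows.map List.tail) out h
        simpa using this

theorem pvZipCols_row_len (rows : List (List Int)) :
    ∀ out ∈ pvZipCols rows, out.length = rows.length := by
  match rows with
  | [] => intro out h; simp [pvZipCols] at h
  | r :: rs => intro out h; exact pvZipAux_row_len _ _ out h

-- a row rebuilt from its own entries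
theorem pv_selfmap (r : List Int) :
    (List.range r.length).map (fun j => r.getD j 0) = r := by
  apply List.ext_getElem
  · simp
  · intro i h1 h2
    simp [List.getD_eq_getElem?_getD, h2]

-- getD through reverse, in bounds
theorem pv_getD_reverse (r : List Int) (c j : Nat) (hc : r.length = c) (hj : j < c) :
    r.reverse.getD j 0 = r.getD (c - 1 - j) 0 := by
  have hj' : j < r.reverse.length := by simp [hc, hj]
  have hj2 : c - 1 - j < r.length := by omega
  rw [List.getD_eq_getElem?_getD, List.getD_eq_getElem?_getD,
      List.getElem?_eq_getElem hj', List.getElem?_eq_getElem hj2]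
  simp only [Option.getD_some]
  rw [List.getElem_reverse]
  congr 1
  omega

theorem pv_mirror_mirror (g : List (List Int)) : pvMirror (pvMirror g) = g := by
  simp [pvMirror, List.map_map]

-- getD through map, in bounds
theorem pv_getD_map (l : List (List Int)) (f : List Int → Int) (j : Nat) (hj : j < l.length) :
    (l.map f).getD j 0 = f l[j] := by
  rw [List.getD_eq_getElem?_getD, List.getElem?_eq_getElem (by simpa using hj)]
  simp

-- rot90 of a rectangular grid is the mirror of its transpose
theorem pv_rot_rect (x : List (List Int)) (c : Nat) (hx : ∀ r ∈ x, r.length = c)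
    (hne : x ≠ []) : pvZipCols x.reverse = pvMirror (pvZipCols x) := by
  have hrx : ∀ r ∈ x.reverse, r.length = c := by
    intro r hr; exact hx r (List.mem_reverse.1 hr)
  have hrne : x.reverse ≠ [] := by simpa using hne
  rw [pvZipCols_eq _ c hrne hrx, pvZipCols_eq x c hne hx]
  simp [pvMirror, List.map_map, List.map_reverse]

-- transpose of the mirror of a rectangular grid is the vertical flip of its transpose
theorem pv_TH (x : List (List Int)) (c : Nat) (hx : ∀ r ∈ x, r.length = c)
    (hne : x ≠ []) : pvZipCols (pvMirror x) = (pvZipCols x).reverse := by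
  have hmx : ∀ r ∈ pvMirror x, r.length = c := by
    intro r hr; rcases List.mem_map.1 hr with ⟨s, hs, rfl⟩; simp [hx s hs]
  have hmne : pvMirror x ≠ [] := by simpa [pvMirror] using hne
  rw [pvZipCols_eq _ c hmne hmx, pvZipCols_eq x c hne hx]
  apply List.ext_getElem
  · simp
  · intro j h1 h2
    simp only [List.length_map, List.length_range] at h1
    simp only [List.getElem_map, List.getElem_range, List.getElem_reverse,
      List.length_map, List.length_range, pvMirror, List.map_map]
    apply List.map_congr_left
    intro r hr
    simp only [Function.comp_apply]
    rw [pv_getD_reverse r c j (hx r hr) h1]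

-- double transpose of a rectangular nonempty grid with nonzero row length
theorem pv_TT (x : List (List Int)) (c : Nat) (hx : ∀ r ∈ x, r.length = c)
    (hne : x ≠ []) (hc : 0 < c) : pvZipCols (pvZipCols x) = x := by
  rw [pvZipCols_eq x c hne hx]
  have hlen : ∀ r ∈ (List.range c).map (fun j => x.map (fun r => r.getD j 0)),
      r.length = x.length := by
    intro r hr; rcases List.mem_map.1 hr with ⟨j, _, rfl⟩; simp
  have hne2 : (List.range c).map (fun j => x.map (fun r => r.getD j 0)) ≠ [] := by
    simp [List.map_eq_nil_iff, List.range_eq_nil]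
    omega
  rw [pvZipCols_eq _ x.length hne2 hlen]
  apply List.ext_getElem
  · simp
  · intro i h1 h2
    simp only [List.length_map, List.length_range] at h1
    simp only [List.getElem_map, List.getElem_range, List.map_map]
    have hstep : ∀ j ∈ List.range c,
        ((fun r => r.getD i 0) ∘ fun j => x.map (fun r => r.getD j 0)) j = x[i].getD j 0 := by
      intro j _
      simp only [Function.comp_apply]
      exact pv_getD_map x (fun r => r.getD j 0) i h1
    rw [List.map_congr_left hstep]
    have hxi : x[i].length = c := hx x[i] (List.getElem_mem h1)
    rw [← hxi]
    exact pv_selfmap x[i]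

-- the core identity: A's iterated rotations agree with B's algebraic forms
theorem pv_core (grid : List (List Int)) :
    let r1 := pvZipCols grid.reverse
    let t := pvZipCols r1
    pvRot r1 = pvMirror t ∧
    pvMirror (pvRot r1) = t ∧
    pvRot (pvRot r1) = (pvMirror r1).reverse ∧
    pvMirror (pvRot (pvRot r1)) = r1.reverse := by
  intro r1 t
  by_cases hr : r1 = []
  · refine ⟨?_, ?_, ?_, ?_⟩ <;> simp [hr, show t = pvZipCols r1 from rfl, pvRot, pvZipCols, pvMirror]
  · have hn : 0 < grid.length := by
      by_contra hcon
      have hg : grid = [] := List.length_eq_zero_iff.1 (by omega)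
      exact hr (by rw [show r1 = pvZipCols grid.reverse from rfl, hg]; rfl)
    have hrow : ∀ out ∈ r1, out.length = grid.length := by
      intro out h
      have := pvZipCols_row_len grid.reverse out h
      simpa using this
    have h1 : pvRot r1 = pvMirror t :=
      pv_rot_rect r1 grid.length hrow hr
    have ht_rows : ∀ out ∈ t, out.length = r1.length := pvZipCols_row_len r1
    have ht_ne : t ≠ [] := by
      have : t = (List.range grid.length).map (fun j => r1.map (fun r => r.getD j 0)) :=
        pvZipCols_eq r1 grid.length hr hrow
      rw [this]
      simp only [ne_eq, List.map_eq_nil_iff, List.range_eq_nil]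
      omega
    have hm_rows : ∀ out ∈ pvMirror t, out.length = r1.length := by
      intro out hout
      rcases List.mem_map.1 hout with ⟨s, hs, rfl⟩
      simp [ht_rows s hs]
    have hm_ne : pvMirror t ≠ [] := by simpa [pvMirror] using ht_ne
    have hTt : pvZipCols t = r1 := pv_TT r1 grid.length hrow hr hn
    have h3 : pvRot (pvRot r1) = (pvMirror r1).reverse := by
      rw [h1, pvRot, pv_rot_rect (pvMirror t) r1.length hm_rows hm_ne,
          pv_TH t r1.length ht_rows ht_ne, hTt]
      simp [pvMirror, List.map_reverse]
    refine ⟨h1, by rw [h1, pv_mirror_mirror], h3, by rw [h3]; simp [pvMirror, List.map_reverse]⟩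


-- ===== VERDICT (by name: the statement is the Claim_ definition above) =====
theorem symetries_spec : Claim_equal_symetries := by
  intro grid _
  unfold Spec_symetries symetries symetries_alt
  obtain ⟨h1, h2, h3, h4⟩ := pv_core grid
  simp only [pvRange04, List.foldl]
  simp only [pvRot] at h1 h2 h3 h4 ⊢
  rw [h4, h3, h2, h1]
  simp
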